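-- pv_equiv track=rewrite | github.com/lgcns5g/LGCNS-5G-AI-RAN-PLATFORM | cmake/helpers/copyright_utils.py | extract_linter_directives
-- ===== SOURCE A (Python) =====
-- def extract_linter_directives(content: str) -> tuple[str, str]:
--     """Extract linter directive lines after shebang."""
--     directives = []
--     remaining = content
--     while remaining.startswith(("# ruff:", "# noqa:", "# type:", "# pylint:")):
--         lines = remaining.split("\n", 1)
--         directives.append(lines[0] + "\n")
--         remaining = lines[1] if len(lines) > 1 else ""
--     return "".join(directives), remaining
-- ===== SOURCE B (Python) =====
-- def extract_linter_directives(content: str) -> tuple[str, str]: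
--     """Extract linter directive lines after shebang."""
--     parts = content.split("\n")
--     i = 0
--     while i < len(parts) and parts[i].startswith(("# ruff:", "# noqa:", "# type:", "# pylint:")):
--         i += 1
--     return "".join(p + "\n" for p in parts[:i]), "\n".join(parts[i:])
-- ===== Notes on version B (the rewrite author's own statement) =====
-- stated objective: simpler
-- what changed: A repeatedly tests the shrinking remaining string and re-splits it with split('\n', 1) once per directive line; B splits the content into lines once, advances an index over the leading directive lines, and reassembles the two halves with join.
import Mathlib
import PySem

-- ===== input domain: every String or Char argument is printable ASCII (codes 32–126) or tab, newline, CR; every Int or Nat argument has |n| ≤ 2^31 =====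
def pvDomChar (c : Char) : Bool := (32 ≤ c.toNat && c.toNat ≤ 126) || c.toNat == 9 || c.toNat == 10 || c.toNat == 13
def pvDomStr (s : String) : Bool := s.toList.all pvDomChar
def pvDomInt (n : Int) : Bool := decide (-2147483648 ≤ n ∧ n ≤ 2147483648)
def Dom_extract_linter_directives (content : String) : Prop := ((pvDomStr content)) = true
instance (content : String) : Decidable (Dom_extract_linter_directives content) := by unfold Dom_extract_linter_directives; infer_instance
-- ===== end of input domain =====

-- B replaces A's repeated startswith+split("\n",1) loop on the shrinking string by one split("\n")
-- followed by an index advance over the list of lines (objective: simpler, single split).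

-- shared helper: s.startswith(("# ruff:", "# noqa:", "# pylint:", ...)) — the tuple form of str.startswith
def pvPrefixes : List (List Char) :=
  ["# ruff:".toList, "# noqa:".toList, "# type:".toList, "# pylint:".toList]

def pvIsDir (s : List Char) : Bool := pvPrefixes.any (fun p => PySem.Chars.startswith s p)

-- lemmas the port of A needs for its termination proof (cited in the decreasing_by below)
theorem pvMemSplit (cs : List Char) (h : '\n' ∈ cs) :
    cs = cs.takeWhile (· ≠ '\n') ++ '\n' :: (cs.dropWhile (· ≠ '\n')).tail := by
  induction cs with
  | nil => cases h
  | cons c r ih =>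
    by_cases hc : c = '\n'
    · subst hc; simp [List.takeWhile, List.dropWhile]
    · have hr : '\n' ∈ r := by cases h with
        | head => exact absurd rfl hc
        | tail _ h => exact h
      have h1 : List.takeWhile (fun x => decide (x ≠ '\n')) (c :: r) =
          c :: List.takeWhile (fun x => decide (x ≠ '\n')) r := by
        rw [List.takeWhile_cons]; simp [hc]
      have h2 : List.dropWhile (fun x => decide (x ≠ '\n')) (c :: r) =
          List.dropWhile (fun x => decide (x ≠ '\n')) r := by
        rw [List.dropWhile_cons]; simp [hc]
      rw [h1, h2]
      simpa using ih hr

theorem pvNotMemTake (cs : List Char) : '\n' ∉ cs.takeWhile (· ≠ '\n') := by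
  intro h
  have := List.mem_takeWhile_imp h
  simp at this

-- splitOnMax.go with sep = ['\n'] : characterizations
theorem pvGoMax_m0 (fuel : ℕ) (l cur : List Char) (acc : List (List Char)) :
    PySem.Chars.splitOnMax.go ['\n'] fuel 0 l cur acc = ((cur.reverse ++ l) :: acc).reverse := by
  cases fuel with
  | zero => simp [PySem.Chars.splitOnMax.go]
  | succ f => cases l with
    | nil => simp [PySem.Chars.splitOnMax.go]
    | cons c r => simp [PySem.Chars.splitOnMax.go]

theorem pvGoMax_no_nl (fuel : ℕ) (l cur : List Char) (acc : List (List Char))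
    (hl : '\n' ∉ l) (hf : l.length ≤ fuel) :
    PySem.Chars.splitOnMax.go ['\n'] fuel 1 l cur acc = acc.reverse ++ [cur.reverse ++ l] := by
  induction fuel generalizing l cur with
  | zero =>
    have : l = [] := List.eq_nil_of_length_eq_zero (Nat.le_zero.mp hf)
    subst this; simp [PySem.Chars.splitOnMax.go]
  | succ f ih =>
    cases l with
    | nil => simp [PySem.Chars.splitOnMax.go]
    | cons c r =>
      have hc : c ≠ '\n' := fun h => hl (h ▸ List.mem_cons_self)
      have hpre : List.isPrefixOf ['\n'] (c :: r) = false := by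
        simp [List.isPrefixOf]; exact fun h => absurd h.symm hc
      simp only [PySem.Chars.splitOnMax.go, hpre]
      rw [if_neg (by omega : ¬ (1 : ℕ) = 0)]
      simp only [Bool.false_eq_true, if_false]
      rw [ih r (c :: cur) (fun h => hl (List.mem_cons_of_mem _ h)) (by simp only [List.length_cons] at hf; omega)]
      simp

theorem pvGoMax_nl (before rest cur : List Char) (acc : List (List Char)) (fuel : ℕ)
    (hb : '\n' ∉ before) (hf : (before ++ '\n' :: rest).length ≤ fuel) :
    PySem.Chars.splitOnMax.go ['\n'] fuel 1 (before ++ '\n' :: rest) cur acc =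
      PySem.Chars.splitOnMax.go ['\n'] (fuel - (before.length + 1)) 0 rest [] ((cur.reverse ++ before) :: acc) := by
  induction before generalizing fuel cur with
  | nil =>
    cases fuel with
    | zero => simp at hf
    | succ f =>
      simp only [List.nil_append]
      simp only [PySem.Chars.splitOnMax.go]
      rw [if_neg (by omega : ¬ (1 : ℕ) = 0)]
      have hpre : List.isPrefixOf ['\n'] ('\n' :: rest) = true := by simp [List.isPrefixOf]
      simp [hpre]
  | cons c b ih =>
    cases fuel with
    | zero => simp at hf
    | succ f =>
      have hc : c ≠ '\n' := fun h => hb (h ▸ List.mem_cons_self)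
      have hpre : List.isPrefixOf ['\n'] (c :: (b ++ '\n' :: rest)) = false := by
        simp [List.isPrefixOf]; exact fun h => absurd h.symm hc
      simp only [List.cons_append, PySem.Chars.splitOnMax.go, hpre]
      rw [if_neg (by omega : ¬ (1 : ℕ) = 0)]
      simp only [Bool.false_eq_true, if_false]
      rw [ih (c :: cur) f (fun h => hb (List.mem_cons_of_mem _ h)) (by simp only [List.length_cons, List.length_append] at hf ⊢ <;> omega)]
      have : f - (b.length + 1) = Nat.succ f - ((c :: b).length + 1) := by simp only [List.length_cons]; omega
      rw [← this]
      simp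

theorem pvSplitOnMax_no_nl (cs : List Char) (h : '\n' ∉ cs) :
    PySem.Chars.splitOnMax cs ['\n'] 1 = [cs] := by
  unfold PySem.Chars.splitOnMax
  rw [if_neg (by omega : ¬ (1:ℤ) < 0)]
  rw [show (1:ℤ).toNat = 1 from rfl]
  rw [pvGoMax_no_nl _ _ _ _ h (by omega)]
  simp

theorem pvSplitOnMax_nl (before rest : List Char) (hb : '\n' ∉ before) :
    PySem.Chars.splitOnMax (before ++ '\n' :: rest) ['\n'] 1 = [before, rest] := by
  unfold PySem.Chars.splitOnMax
  rw [if_neg (by omega : ¬ (1:ℤ) < 0)]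
  rw [show (1:ℤ).toNat = 1 from rfl]
  rw [pvGoMax_nl _ _ _ _ _ hb (by omega)]
  rw [pvGoMax_m0]
  simp

-- ===== PORT A =====
-- while remaining.startswith(...): lines = remaining.split("\n", 1); directives.append(lines[0]+"\n");
--   remaining = lines[1] if len(lines) > 1 else ""
def pvLoopA (remaining : List Char) (directives : List (List Char)) :
    List (List Char) × List Char :=
  if h : pvIsDir remaining = true then
    let lines := PySem.Chars.splitOnMax remaining ['\n'] 1
    pvLoopA (if 1 < lines.length then lines.getD 1 [] else [])
            (directives ++ [lines.getD 0 [] ++ ['\n']])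
  else (directives, remaining)
termination_by remaining.length
decreasing_by
  have hne : remaining ≠ [] := by
    intro hnil; rw [hnil] at h; exact absurd h (by decide)
  by_cases hmem : '\n' ∈ remaining
  · have hnot := pvNotMemTake remaining
    rw [pvMemSplit remaining hmem, pvSplitOnMax_nl _ _ hnot]
    split
    · simp only [List.getD, List.getElem?_cons_succ, List.getElem?_cons_zero, Option.getD_some,
        List.length_append, List.length_cons]
      omega
    · simp only [List.length_nil, List.length_append, List.length_cons]
      omega
  · rw [pvSplitOnMax_no_nl _ hmem]
    split
    · simp_all
    · simp only [List.length_nil]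
      exact List.length_pos_of_ne_nil hne

def extract_linter_directives (content : String) : String × String :=
  let r := pvLoopA content.toList []
  (String.mk (PySem.Chars.join [] r.1), String.mk r.2)

-- ===== PORT B =====
-- i = 0; while i < len(parts) and parts[i].startswith(...): i += 1   — structural recursion over parts
def pvCount : List (List Char) → Nat
  | [] => 0
  | p :: rest => if pvIsDir p then pvCount rest + 1 else 0

def extract_linter_directives_alt (content : String) : String × String :=
  let parts := PySem.Chars.splitOn content.toList ['\n']
  let i := pvCount parts
  (String.mk (PySem.Chars.join [] ((PySem.List.slice parts none (some (i : Int))).map (· ++ ['\n']))),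
   String.mk (PySem.Chars.join ['\n'] (PySem.List.slice parts (some (i : Int)) none)))

-- ===== PRECONDITION & SPEC =====
def Spec_extract_linter_directives (content : String) (out : String × String) : Prop := out = extract_linter_directives_alt content
instance (content : String) (out : String × String) : Decidable (Spec_extract_linter_directives content out) := by unfold Spec_extract_linter_directives; infer_instance

-- ===== CLAIM (what is proved, stated in full; the proofs are below) =====
def Claim_equal_extract_linter_directives : Prop := ∀ (content : String), Dom_extract_linter_directives content → Spec_extract_linter_directives content (extract_linter_directives content)

-- ===== LEMMAS AND PROOFS =====

-- splitOn.go with sep = ['\n'] : characterizations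
theorem pvGo_acc (fuel : ℕ) (l cur : List Char) (acc : List (List Char)) :
    PySem.Chars.splitOn.go ['\n'] fuel l cur acc =
      acc.reverse ++ PySem.Chars.splitOn.go ['\n'] fuel l cur [] := by
  induction fuel generalizing l cur acc with
  | zero => simp [PySem.Chars.splitOn.go]
  | succ f ih =>
    cases l with
    | nil => simp [PySem.Chars.splitOn.go]
    | cons c r =>
      by_cases hpre : List.isPrefixOf ['\n'] (c :: r) = true
      · simp only [PySem.Chars.splitOn.go, hpre, if_true]
        rw [ih _ _ (cur.reverse :: acc), ih _ _ [cur.reverse]]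
        simp
      · simp only [PySem.Chars.splitOn.go, hpre]
        simp only [Bool.false_eq_true, if_false]
        rw [ih r (c :: cur) acc]

theorem pvGo_no_nl (fuel : ℕ) (l cur : List Char) (acc : List (List Char))
    (hl : '\n' ∉ l) (hf : l.length ≤ fuel) :
    PySem.Chars.splitOn.go ['\n'] fuel l cur acc = acc.reverse ++ [cur.reverse ++ l] := by
  induction fuel generalizing l cur with
  | zero =>
    have : l = [] := List.eq_nil_of_length_eq_zero (Nat.le_zero.mp hf)
    subst this; simp [PySem.Chars.splitOn.go]
  | succ f ih =>
    cases l with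
    | nil => simp [PySem.Chars.splitOn.go]
    | cons c r =>
      have hc : c ≠ '\n' := fun h => hl (h ▸ List.mem_cons_self)
      have hpre : List.isPrefixOf ['\n'] (c :: r) = false := by
        simp [List.isPrefixOf]; exact fun h => absurd h.symm hc
      simp only [PySem.Chars.splitOn.go, hpre]
      simp only [Bool.false_eq_true, if_false]
      rw [ih r (c :: cur) (fun h => hl (List.mem_cons_of_mem _ h)) (by simp only [List.length_cons, List.length_append] at hf ⊢; omega)]
      simp

theorem pvGo_nl (before rest cur : List Char) (acc : List (List Char)) (fuel : ℕ)
    (hb : '\n' ∉ before) (hf : (before ++ '\n' :: rest).length ≤ fuel) :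
    PySem.Chars.splitOn.go ['\n'] fuel (before ++ '\n' :: rest) cur acc =
      PySem.Chars.splitOn.go ['\n'] (fuel - (before.length + 1)) rest [] ((cur.reverse ++ before) :: acc) := by
  induction before generalizing fuel cur with
  | nil =>
    cases fuel with
    | zero => simp at hf
    | succ f =>
      have hpre : List.isPrefixOf ['\n'] ('\n' :: rest) = true := by simp [List.isPrefixOf]
      simp only [List.nil_append, PySem.Chars.splitOn.go, hpre, if_true]
      simp
  | cons c b ih =>
    cases fuel with
    | zero => simp at hf
    | succ f =>
      have hc : c ≠ '\n' := fun h => hb (h ▸ List.mem_cons_self)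
      have hpre : List.isPrefixOf ['\n'] (c :: (b ++ '\n' :: rest)) = false := by
        simp [List.isPrefixOf]; exact fun h => absurd h.symm hc
      simp only [List.cons_append, PySem.Chars.splitOn.go, hpre]
      simp only [Bool.false_eq_true, if_false]
      rw [ih (c :: cur) f (fun h => hb (List.mem_cons_of_mem _ h)) (by simp only [List.length_cons, List.length_append] at hf ⊢ <;> omega)]
      have : f - (b.length + 1) = Nat.succ f - ((c :: b).length + 1) := by simp only [List.length_cons]; omega
      rw [← this]
      simp

theorem pvSplitOn_no_nl (cs : List Char) (h : '\n' ∉ cs) :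
    PySem.Chars.splitOn cs ['\n'] = [cs] := by
  unfold PySem.Chars.splitOn
  rw [pvGo_no_nl _ _ _ _ h (by omega)]
  simp

theorem pvSplitOn_nl (before rest : List Char) (hb : '\n' ∉ before) :
    PySem.Chars.splitOn (before ++ '\n' :: rest) ['\n'] = before :: PySem.Chars.splitOn rest ['\n'] := by
  unfold PySem.Chars.splitOn
  rw [pvGo_nl _ _ _ _ _ hb (by omega)]
  rw [pvGo_acc]
  have : (before ++ '\n' :: rest).length + 1 - (before.length + 1) = rest.length + 1 := by
    rw [List.length_append, List.length_cons]; omega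
  rw [this]
  simp

theorem pvSplitOn_ne_nil (cs : List Char) : PySem.Chars.splitOn cs ['\n'] ≠ [] := by
  by_cases h : '\n' ∈ cs
  · rw [pvMemSplit cs h, pvSplitOn_nl _ _ (pvNotMemTake cs)]; simp
  · rw [pvSplitOn_no_nl cs h]; simp

theorem pvJoin_nil : PySem.Chars.join ['\n'] ([] : List (List Char)) = [] := by
  simp [PySem.Chars.join, List.intercalate]

theorem pvJoin_singleton (a : List Char) : PySem.Chars.join ['\n'] [a] = a := by
  simp [PySem.Chars.join, List.intercalate]

theorem pvJoin_cons (a : List Char) (l : List (List Char)) (hl : l ≠ []) :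
    PySem.Chars.join ['\n'] (a :: l) = a ++ '\n' :: PySem.Chars.join ['\n'] l := by
  cases l with
  | nil => exact absurd rfl hl
  | cons b t =>
    simp [PySem.Chars.join, List.intercalate, List.intersperse]

theorem pvJoin_splitOn (n : ℕ) : ∀ cs : List Char, cs.length ≤ n →
    PySem.Chars.join ['\n'] (PySem.Chars.splitOn cs ['\n']) = cs := by
  induction n with
  | zero =>
    intro cs h
    have : cs = [] := List.eq_nil_of_length_eq_zero (Nat.le_zero.mp h)
    subst this
    rw [pvSplitOn_no_nl [] (by simp), pvJoin_singleton]
  | succ n ih =>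
    intro cs h
    by_cases hm : '\n' ∈ cs
    · have hdec := pvMemSplit cs hm
      conv_lhs => rw [hdec]
      conv_rhs => rw [hdec]
      rw [pvSplitOn_nl _ _ (pvNotMemTake cs)]
      rw [pvJoin_cons _ _ (pvSplitOn_ne_nil _)]
      rw [ih _ (by
        have hlen := congrArg List.length hdec
        rw [List.length_append, List.length_cons] at hlen
        omega)]
    · rw [pvSplitOn_no_nl cs hm, pvJoin_singleton]

theorem pvPrefix_append_nl (p before rest : List Char) (hp : '\n' ∉ p) :
    List.isPrefixOf p (before ++ '\n' :: rest) = List.isPrefixOf p before := by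
  induction p generalizing before with
  | nil => simp [List.isPrefixOf]
  | cons c p' ih =>
    cases before with
    | nil =>
      have hc : c ≠ '\n' := fun h => hp (h ▸ List.mem_cons_self)
      simp [List.isPrefixOf]
      exact fun h => absurd h hc
    | cons b b' =>
      simp only [List.cons_append, List.isPrefixOf]
      rw [ih b' (fun h => hp (List.mem_cons_of_mem _ h))]

theorem pvIsDir_append_nl (before rest : List Char) :
    pvIsDir (before ++ '\n' :: rest) = pvIsDir before := by
  simp only [pvIsDir, pvPrefixes, List.any_cons, List.any_nil, PySem.Chars.startswith]
  rw [pvPrefix_append_nl _ before rest (by decide),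
      pvPrefix_append_nl _ before rest (by decide),
      pvPrefix_append_nl _ before rest (by decide),
      pvPrefix_append_nl _ before rest (by decide)]

theorem pvLoopA_eq (n : ℕ) : ∀ (cs : List Char), cs.length ≤ n → ∀ dirs,
    pvLoopA cs dirs =
      (dirs ++ ((PySem.Chars.splitOn cs ['\n']).take (pvCount (PySem.Chars.splitOn cs ['\n']))).map (· ++ ['\n']),
       PySem.Chars.join ['\n'] ((PySem.Chars.splitOn cs ['\n']).drop (pvCount (PySem.Chars.splitOn cs ['\n'])))) := by
  induction n with
  | zero =>
    intro cs h dirs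
    have : cs = [] := List.eq_nil_of_length_eq_zero (Nat.le_zero.mp h)
    subst this
    rw [pvLoopA]
    rw [dif_neg (by decide)]
    rw [pvSplitOn_no_nl [] (by simp)]
    have hc : pvCount [([] : List Char)] = 0 := by
      simp [pvCount]; decide
    rw [hc]
    simp [pvJoin_singleton]
  | succ n ih =>
    intro cs h dirs
    by_cases hd : pvIsDir cs = true
    · by_cases hm : '\n' ∈ cs
      · have hdec := pvMemSplit cs hm
        set t := cs.takeWhile (· ≠ '\n') with ht
        set d := (cs.dropWhile (· ≠ '\n')).tail with hdt
        have hlen : cs.length = t.length + 1 + d.length := by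
          conv_lhs => rw [hdec]
          simp; omega
        rw [pvLoopA, dif_pos hd]
        simp only
        conv_lhs => rw [hdec]
        rw [pvSplitOnMax_nl _ _ (pvNotMemTake cs)]
        simp only [List.length_cons, List.length_nil]
        rw [if_pos (by omega)]
        simp only [List.getD]
        simp only [List.getElem?_cons_succ, List.getElem?_cons_zero, Option.getD_some]
        rw [ih d (by omega) (dirs ++ [t ++ ['\n']])]
        conv_rhs => rw [hdec]
        rw [pvSplitOn_nl _ _ (pvNotMemTake cs)]
        have hdt' : pvIsDir t = true := by
          rw [← pvIsDir_append_nl t d, ← hdec]; exact hd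
        have hcnt : pvCount (t :: PySem.Chars.splitOn d ['\n']) =
            pvCount (PySem.Chars.splitOn d ['\n']) + 1 := by
          simp [pvCount, hdt']
        rw [hcnt]
        simp only [List.take_succ_cons, List.drop_succ_cons, List.map_cons]
        simp
        rw [ht]
        simp only [ne_eq, decide_not]
      · rw [pvLoopA, dif_pos hd]
        simp only
        rw [pvSplitOnMax_no_nl _ hm]
        simp only [List.length_cons, List.length_nil]
        rw [if_neg (by omega)]
        rw [pvLoopA, dif_neg (by decide)]
        rw [pvSplitOn_no_nl _ hm]
        simp only [List.getD, List.getElem?_cons_zero, Option.getD_some]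
        simp only [pvCount, hd, if_true]
        simp [pvJoin_nil]
    · rw [pvLoopA, dif_neg hd]
      by_cases hm : '\n' ∈ cs
      · have hdec := pvMemSplit cs hm
        conv_rhs => rw [hdec]
        rw [pvSplitOn_nl _ _ (pvNotMemTake cs)]
        have hdt' : pvIsDir (cs.takeWhile (· ≠ '\n')) = false := by
          rw [← pvIsDir_append_nl _ ((cs.dropWhile (· ≠ '\n')).tail), ← hdec]
          exact Bool.not_eq_true _ ▸ (by simpa using hd)
        simp only [pvCount, hdt']
        simp only [Bool.false_eq_true, if_false, List.take_zero, List.drop_zero, List.map_nil, List.append_nil]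
        rw [pvJoin_cons _ _ (pvSplitOn_ne_nil _)]
        rw [pvJoin_splitOn _ _ (le_refl _)]
        rw [← hdec]
      · rw [pvSplitOn_no_nl _ hm]
        have hdt' : pvIsDir cs = false := by simpa using hd
        simp only [pvCount, hdt']
        simp only [Bool.false_eq_true, if_false, List.take_zero, List.drop_zero, List.map_nil, List.append_nil]
        rw [pvJoin_singleton]

-- ===== VERDICT (by name: the statement is the Claim_ definition above) =====
theorem extract_linter_directives_spec : Claim_equal_extract_linter_directives := by
  unfold Claim_equal_extract_linter_directives
  intro content _
  unfold Spec_extract_linter_directives extract_linter_directives extract_linter_directives_alt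
  simp only
  rw [pvLoopA_eq content.toList.length content.toList (le_refl _) []]
  simp only [List.nil_append]
  rw [PySem.List.slice_to_natCast, PySem.List.slice_from_natCast]
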